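-- pv_equiv track=rewrite | github.com/zhongzisha/gd | myutils.py | compute_offsets
-- ===== SOURCE A (Python) =====
-- def compute_offsets(height, width, subsize, gap):
--     slide = subsize - gap
--     start_positions = []
--     left, up = 0, 0
--     while left < width:
--         # if left + subsize >= width:
--         #     left = max(width - subsize, 0)
--         up = 0
--         while up < height:
--             # if up + subsize >= height:
--             #     up = max(height - subsize, 0)
--             right = min(left + subsize, width)
--             down = min(up + subsize, height)
--             sub_width = right - left
--             sub_height = down - up
--
--             start_positions.append([left, up, sub_width, sub_height])
--
--             if up + subsize >= height:
--                 break
--             else: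
--                 up = up + slide
--         if left + subsize >= width:
--             break
--         else:
--             left = left + slide
--     return start_positions
-- ===== SOURCE B (Python) =====
-- def compute_offsets(height, width, subsize, gap):
--     slide = subsize - gap
--
--     def spans(limit):
--         # closed-form tile count along one axis, then positions by index
--         if limit <= 0:
--             return []
--         if subsize >= limit:
--             n = 1
--         else:
--             n = min(-(-(limit - subsize) // slide) + 1, -(-limit // slide))
--         return [(k * slide, min(k * slide + subsize, limit) - k * slide)
--                 for k in range(n)]
--
--     return [[l, u, sw, sh] for (l, sw) in spans(width) for (u, sh) in spans(height)]
-- ===== Notes on version B (the rewrite author's own statement) =====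
-- stated objective: alternative
-- what changed: Replaces the intertwined include-then-break while-scans with closed-form arithmetic: the number of tiles per axis is computed by ceiling division, positions are generated by index (k*slide) per axis, and the grid is their Cartesian product.
import Mathlib
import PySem

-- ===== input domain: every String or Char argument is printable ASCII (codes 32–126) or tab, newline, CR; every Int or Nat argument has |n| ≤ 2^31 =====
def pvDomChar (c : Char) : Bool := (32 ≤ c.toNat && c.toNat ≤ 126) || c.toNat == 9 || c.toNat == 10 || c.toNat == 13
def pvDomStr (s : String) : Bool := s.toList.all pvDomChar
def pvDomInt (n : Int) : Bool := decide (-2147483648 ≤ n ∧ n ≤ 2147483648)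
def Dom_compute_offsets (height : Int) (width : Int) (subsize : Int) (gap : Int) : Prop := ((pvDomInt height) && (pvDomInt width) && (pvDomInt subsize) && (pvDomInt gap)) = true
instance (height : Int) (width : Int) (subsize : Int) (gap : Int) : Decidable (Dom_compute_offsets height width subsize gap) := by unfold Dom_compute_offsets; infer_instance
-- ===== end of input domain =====

-- B replaces A's include-then-break while-scans by a closed-form per-axis tile count
-- (ceiling division) and index-generated positions (objective: alternative; same cost).
-- A's while loops are ported with a fixed fuel that only makes the port total; within
-- Pre_ (where the Python terminates) and Dom the fuel is never exhausted.

def pvFuel : Nat := 2 ^ 33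

-- ===== PORT A =====
-- inner 'while up < height' loop of A
def pvInnerA (height width subsize slide left : Int) : Nat → Int → List (List Int) → List (List Int)
  | 0, _, acc => acc
  | fuel + 1, up, acc =>
    if up < height then
      let right := min (left + subsize) width
      let down := min (up + subsize) height
      let acc' := acc ++ [[left, up, right - left, down - up]]
      if up + subsize ≥ height then acc'
      else pvInnerA height width subsize slide left fuel (up + slide) acc'
    else acc

-- outer 'while left < width' loop of A
def pvOuterA (height width subsize slide : Int) : Nat → Int → List (List Int) → List (List Int)
  | 0, _, acc => acc
  | fuel + 1, left, acc =>
    if left < width then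
      let acc' := pvInnerA height width subsize slide left pvFuel 0 acc
      if left + subsize ≥ width then acc'
      else pvOuterA height width subsize slide fuel (left + slide) acc'
    else acc

def compute_offsets (height : Int) (width : Int) (subsize : Int) (gap : Int) : List (List Int) :=
  pvOuterA height width subsize (subsize - gap) pvFuel 0 []

-- ===== PORT B =====
-- B's 'spans' helper: closed-form tile count, positions generated from range(n)
def pvSpansB (subsize slide limit : Int) : List (Int × Int) :=
  if limit ≤ 0 then []
  else
    let n : Int :=
      if subsize ≥ limit then 1
      else min (-(PySem.Int.floordiv (-(limit - subsize)) slide) + 1)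
               (-(PySem.Int.floordiv (-limit) slide))
    (PySem.List.pyRange 0 n 1).map
      (fun k => (k * slide, min (k * slide + subsize) limit - k * slide))

def compute_offsets_alt (height : Int) (width : Int) (subsize : Int) (gap : Int) : List (List Int) :=
  (pvSpansB subsize (subsize - gap) width).flatMap (fun p =>
    (pvSpansB subsize (subsize - gap) height).map (fun q => [p.1, q.1, p.2, q.2]))

-- ===== PRECONDITION & SPEC =====
-- Pre_ excludes exactly the inputs on which Python A never returns (its while loops
-- diverge when the non-positive slide fails to advance a still-open axis); A returns
-- on every input satisfying Pre_, and on no other input.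
def Pre_compute_offsets (height : Int) (width : Int) (subsize : Int) (gap : Int) : Prop :=
  width ≤ 0 ∨ 0 < subsize - gap ∨ (width ≤ subsize ∧ (height ≤ 0 ∨ height ≤ subsize))
instance (height : Int) (width : Int) (subsize : Int) (gap : Int) : Decidable (Pre_compute_offsets height width subsize gap) := by unfold Pre_compute_offsets; infer_instance

def pvWitness_compute_offsets : Int × Int × Int × Int := (5, 5, 2, 1)

def Spec_compute_offsets (height : Int) (width : Int) (subsize : Int) (gap : Int) (out : List (List Int)) : Prop := out = compute_offsets_alt height width subsize gap
instance (height : Int) (width : Int) (subsize : Int) (gap : Int) (out : List (List Int)) : Decidable (Spec_compute_offsets height width subsize gap out) := by unfold Spec_compute_offsets; infer_instance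

-- ===== CLAIM (what is proved, stated in full; the proofs are below) =====
def Claim_equal_compute_offsets : Prop := ∀ (height : Int) (width : Int) (subsize : Int) (gap : Int), Dom_compute_offsets height width subsize gap → Pre_compute_offsets height width subsize gap → Spec_compute_offsets height width subsize gap (compute_offsets height width subsize gap)

-- ===== LEMMAS AND PROOFS =====

-- A's axis scan without accumulator (proof-only helper)
def pvAxisPure (limit subsize slide : Int) : Nat → Int → List (Int × Int)
  | 0, _ => []
  | fuel + 1, pos =>
    if pos < limit then
      if pos + subsize ≥ limit then [(pos, min (pos + subsize) limit - pos)]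
      else (pos, min (pos + subsize) limit - pos) :: pvAxisPure limit subsize slide fuel (pos + slide)
    else []

theorem pvAxisPure_nil (limit subsize slide : Int) (fuel : Nat) (pos : Int)
    (h : ¬ pos < limit) : pvAxisPure limit subsize slide fuel pos = [] := by
  cases fuel <;> simp [pvAxisPure, h]

theorem pvAxisPure_single (limit subsize slide : Int) (fuel : Nat) (pos : Int)
    (hfuel : fuel ≠ 0) (h1 : pos < limit) (h2 : pos + subsize ≥ limit) :
    pvAxisPure limit subsize slide fuel pos = [(pos, min (pos + subsize) limit - pos)] := by
  cases fuel with
  | zero => exact absurd rfl hfuel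
  | succ f => simp [pvAxisPure, h1, h2]

theorem pvAxisPure_snd (limit subsize slide : Int) :
    ∀ (fuel : Nat) (pos : Int) (p : Int × Int),
      p ∈ pvAxisPure limit subsize slide fuel pos → p.2 = min (p.1 + subsize) limit - p.1 := by
  intro fuel
  induction fuel with
  | zero => intro pos p hp; simp [pvAxisPure] at hp
  | succ f ih =>
    intro pos p hp
    simp only [pvAxisPure] at hp
    split_ifs at hp with h1 h2
    · simp at hp; subst hp; simp
    · rcases List.mem_cons.mp hp with h | h
      · subst h; simp
      · exact ih _ _ h
    · simp at hp

theorem pvFuel_ne_zero : pvFuel ≠ 0 := by norm_num [pvFuel]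

theorem pvInnerA_eq (height width subsize slide left : Int) :
    ∀ (fuel : Nat) (up : Int) (acc : List (List Int)),
      pvInnerA height width subsize slide left fuel up acc =
        acc ++ (pvAxisPure height subsize slide fuel up).map
          (fun q => [left, q.1, min (left + subsize) width - left, q.2]) := by
  intro fuel
  induction fuel with
  | zero => intro up acc; simp [pvInnerA, pvAxisPure]
  | succ f ih =>
    intro up acc
    simp only [pvInnerA, pvAxisPure]
    split_ifs with h1 h2
    · simp
    · rw [ih]; simp
    · simp

theorem pvOuterA_eq (height width subsize slide : Int) :
    ∀ (fuel : Nat) (left : Int) (acc : List (List Int)),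
      pvOuterA height width subsize slide fuel left acc =
        acc ++ (pvAxisPure width subsize slide fuel left).flatMap (fun p =>
          (pvAxisPure height subsize slide pvFuel 0).map
            (fun q => [p.1, q.1, min (p.1 + subsize) width - p.1, q.2])) := by
  intro fuel
  induction fuel with
  | zero => intro left acc; simp [pvOuterA, pvAxisPure]
  | succ f ih =>
    intro left acc
    simp only [pvOuterA, pvAxisPure]
    split_ifs with h1 h2
    · rw [pvInnerA_eq]; simp
    · rw [ih, pvInnerA_eq]; simp
    · simp

-- ceiling division ⌈a / s⌉ written the way B writes it
def pvCeil (a s : Int) : Int := -(PySem.Int.floordiv (-a) s)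

theorem pvCeil_nonpos {a s : Int} (hs : 0 < s) (ha : a ≤ 0) : pvCeil a s ≤ 0 := by
  have h := (PySem.Int.neg_floordiv_neg_eq_iff_of_pos (a := a) (b := s) (q := pvCeil a s) hs).mp rfl
  nlinarith [h.1, h.2]

theorem pvCeil_pos {a s : Int} (hs : 0 < s) (ha : 1 ≤ a) : 1 ≤ pvCeil a s := by
  have h := (PySem.Int.neg_floordiv_neg_eq_iff_of_pos (a := a) (b := s) (q := pvCeil a s) hs).mp rfl
  nlinarith [h.1, h.2]

theorem pvCeil_eq_one {a s : Int} (hs : 0 < s) (h1 : 1 ≤ a) (h2 : a ≤ s) : pvCeil a s = 1 := by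
  have := (PySem.Int.neg_floordiv_neg_eq_iff_of_pos (a := a) (b := s) (q := 1) hs).mpr ⟨by omega, by omega⟩
  exact this

theorem pvCeil_sub_self {a s : Int} (hs : 0 < s) : pvCeil (a - s) s = pvCeil a s - 1 := by
  have h := (PySem.Int.neg_floordiv_neg_eq_iff_of_pos (a := a) (b := s) (q := pvCeil a s) hs).mp rfl
  exact (PySem.Int.neg_floordiv_neg_eq_iff_of_pos (a := a - s) (b := s) (q := pvCeil a s - 1) hs).mpr
    ⟨by nlinarith [h.1, h.2], by nlinarith [h.1, h.2]⟩

-- the per-axis tile count starting at position pos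
def pvCnt (limit subsize slide pos : Int) : Int :=
  min (max (pvCeil (limit - subsize - pos) slide) 0 + 1) (pvCeil (limit - pos) slide)

theorem pvCnt_pos {limit subsize slide pos : Int} (hs : 0 < slide) (hp : pos < limit) :
    1 ≤ pvCnt limit subsize slide pos := by
  have h2 := pvCeil_pos (a := limit - pos) hs (by omega)
  unfold pvCnt; omega

-- A's axis scan equals the index-generated list of pvCnt positions
theorem pvAxis_closed (limit subsize slide : Int) (hs : 0 < slide) :
    ∀ (fuel : Nat) (pos : Int), pos < limit → limit - pos ≤ (fuel : Int) →
      pvAxisPure limit subsize slide fuel pos =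
        (List.range (pvCnt limit subsize slide pos).toNat).map
          (fun j : Nat => (pos + (j : Int) * slide,
            min (pos + (j : Int) * slide + subsize) limit - (pos + (j : Int) * slide))) := by
  intro fuel
  induction fuel with
  | zero => intro pos hp hf; exfalso; push_cast at hf; omega
  | succ f ih =>
    intro pos hp hf
    simp only [pvAxisPure, if_pos hp]
    by_cases hb : pos + subsize ≥ limit
    · rw [if_pos hb]
      have hc1 : pvCeil (limit - subsize - pos) slide ≤ 0 := pvCeil_nonpos hs (by omega)
      have hc2 : 1 ≤ pvCeil (limit - pos) slide := pvCeil_pos hs (by omega)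
      have : pvCnt limit subsize slide pos = 1 := by unfold pvCnt; omega
      rw [this]; simp
    · rw [if_neg hb]
      have hX : 1 ≤ limit - subsize - pos := by omega
      have hc1 : 1 ≤ pvCeil (limit - subsize - pos) slide := pvCeil_pos hs hX
      by_cases hnext : pos + slide < limit
      · -- count shifts by one
        have e1 : pvCeil (limit - subsize - (pos + slide)) slide
            = pvCeil (limit - subsize - pos) slide - 1 := by
          have := pvCeil_sub_self (a := limit - subsize - pos) (s := slide) hs
          rw [show limit - subsize - (pos + slide) = limit - subsize - pos - slide by ring, this]
        have e2 : pvCeil (limit - (pos + slide)) slide = pvCeil (limit - pos) slide - 1 := by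
          have := pvCeil_sub_self (a := limit - pos) (s := slide) hs
          rw [show limit - (pos + slide) = limit - pos - slide by ring, this]
        have hc2' : 1 ≤ pvCeil (limit - (pos + slide)) slide := pvCeil_pos hs (by omega)
        have hcnt : pvCnt limit subsize slide pos = pvCnt limit subsize slide (pos + slide) + 1 := by
          unfold pvCnt; rw [e1, e2]; omega
        have hcnt1 : 1 ≤ pvCnt limit subsize slide (pos + slide) := pvCnt_pos hs hnext
        rw [ih (pos + slide) hnext (by omega), hcnt]
        have htn : (pvCnt limit subsize slide (pos + slide) + 1).toNat
            = (pvCnt limit subsize slide (pos + slide)).toNat + 1 := by omega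
        rw [htn, List.range_succ_eq_map]
        simp only [List.map_cons, List.map_map]
        congr 1
        · norm_num
        · apply List.map_congr_left
          intro j hj
          simp only [Function.comp_apply]
          have e : pos + ((Nat.succ j : Nat) : Int) * slide = pos + slide + (j : Int) * slide := by
            push_cast; ring
          rw [e]
      · -- last position: count from pos is 1, tail is empty
        have hc2 : pvCeil (limit - pos) slide = 1 := pvCeil_eq_one hs (by omega) (by omega)
        have hcnt : pvCnt limit subsize slide pos = 1 := by unfold pvCnt; omega
        have htail : pvAxisPure limit subsize slide f (pos + slide) = [] := by
          cases f with
          | zero => rfl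
          | succ f' => simp only [pvAxisPure]; rw [if_neg (by omega)]
        rw [htail, hcnt]; simp

-- B's spans equal A's axis scan at full fuel, on every axis admitted by Pre_
theorem pvSpans_eq_axis (limit subsize slide : Int)
    (hdom : -2147483648 ≤ limit ∧ limit ≤ 2147483648)
    (hok : limit ≤ 0 ∨ 0 < slide ∨ limit ≤ subsize) :
    pvSpansB subsize slide limit = pvAxisPure limit subsize slide pvFuel 0 := by
  by_cases hl : limit ≤ 0
  · rw [pvAxisPure_nil limit subsize slide pvFuel 0 (by omega)]
    unfold pvSpansB
    rw [if_pos hl]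
  · by_cases hsub : subsize ≥ limit
    · -- single tile, no division
      rw [pvAxisPure_single limit subsize slide pvFuel 0 pvFuel_ne_zero (by omega) (by omega)]
      unfold pvSpansB
      rw [if_neg hl]
      simp only [ge_iff_le, if_pos hsub]
      rw [PySem.List.pyRange_one (a := 0) (b := 1)]
      simp
    · have hs : 0 < slide := by omega
      rw [pvAxis_closed limit subsize slide hs pvFuel 0 (by omega)
        (by unfold pvFuel; push_cast; omega)]
      unfold pvSpansB
      rw [if_neg hl]
      simp only [ge_iff_le, if_neg hsub]
      have hc1 : 1 ≤ pvCeil (limit - subsize) slide := pvCeil_pos hs (by omega)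
      have hn : min (-(PySem.Int.floordiv (-(limit - subsize)) slide) + 1)
                   (-(PySem.Int.floordiv (-limit) slide))
          = pvCnt limit subsize slide 0 := by
        show min (pvCeil (limit - subsize) slide + 1) (pvCeil limit slide) = _
        unfold pvCnt
        have h0 : max (pvCeil (limit - subsize - 0) slide) 0 = pvCeil (limit - subsize) slide := by
          rw [show limit - subsize - 0 = limit - subsize by ring]; omega
        rw [h0, show limit - 0 = limit by ring]
      rw [hn]
      rw [PySem.List.pyRange_one (a := 0) (b := pvCnt limit subsize slide 0)]
      rw [show pvCnt limit subsize slide 0 - 0 = pvCnt limit subsize slide 0 by ring]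
      rw [List.map_map]
      apply List.map_congr_left
      intro j hj
      simp only [Function.comp_apply]
      have e : ((0 : Int) + (j : Int)) * slide = 0 + (j : Int) * slide := by ring
      rw [e]

theorem pvFlatMap_congr {α β : Type} (l : List α) (f g : α → List β)
    (h : ∀ a ∈ l, f a = g a) : l.flatMap f = l.flatMap g := by
  induction l with
  | nil => rfl
  | cons a t ih =>
    simp only [List.flatMap_cons]
    rw [h a (List.mem_cons_self), ih (fun x hx => h x (List.mem_cons_of_mem a hx))]

-- ===== VERDICT (by name: the statement is the Claim_ definition above) =====
theorem compute_offsets_spec : Claim_equal_compute_offsets := by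
  intro height width subsize gap hdom hpre
  unfold Spec_compute_offsets compute_offsets compute_offsets_alt
  unfold Dom_compute_offsets pvDomInt at hdom
  simp only [Bool.and_eq_true, decide_eq_true_eq] at hdom
  unfold Pre_compute_offsets at hpre
  rw [pvOuterA_eq]
  simp only [List.nil_append]
  by_cases hH : height ≤ 0 ∨ 0 < subsize - gap ∨ height ≤ subsize
  · have eqW := pvSpans_eq_axis width subsize (subsize - gap) (by tauto) (by omega)
    have eqH := pvSpans_eq_axis height subsize (subsize - gap) (by tauto) hH
    rw [eqW, eqH]
    refine pvFlatMap_congr _ _ _ (fun p hp => ?_)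
    rw [pvAxisPure_snd width subsize (subsize - gap) pvFuel 0 p hp]
  · -- slide ≤ 0 and the height axis would diverge, so Pre_ forces width ≤ 0: both sides empty
    have hw : width ≤ 0 := by omega
    rw [pvAxisPure_nil width subsize (subsize - gap) pvFuel 0 (by omega)]
    unfold pvSpansB
    rw [if_pos hw]
    simp
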